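-- pv_equiv track=rewrite | github.com/davidxia3/YoungTableaux | src/schensted_insertion.py | find_shape
-- ===== SOURCE A (Python) =====
-- def insertion(insertion_tableau, number):
--     row = 0
--     while True:
--         if len(insertion_tableau) <= row:
--             insertion_tableau.append([number])
--             return insertion_tableau, (row, 0)
--
--         column = len(insertion_tableau[row])
--
--         while column > 0 and number < insertion_tableau[row][column-1]:
--             column = column - 1
--
--         if column == len(insertion_tableau[row]):
--             insertion_tableau[row].append(number)
--             return insertion_tableau, (row, column)
--
--         temp = insertion_tableau[row][column]
--         insertion_tableau[row][column] = number
--         number = temp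
--
--         row = row + 1
--
-- def recording(recording_tableau, index, position):
--     if len(recording_tableau) <= position[0]:
--         recording_tableau.append([index])
--         return recording_tableau
--
--     if len(recording_tableau[position[0]]) <= position[1]:
--         recording_tableau[position[0]].append(index)
--         return recording_tableau
--
--     recording_tableau[position[0]][position[1]] = index
--
-- def find_shape(permutation):
--     insertion_tableau = []
--     recording_tableau = []
--
--     for i in range(len(permutation)):
--         insertion_tableau, record = insertion(insertion_tableau, permutation[i])
--         recording_tableau = recording(recording_tableau, i + 1, record)
--
--
--     s = ""
--     for i in range(len(insertion_tableau)):
--         s = s + str(len(insertion_tableau[i])) + "-"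
--     return s
-- ===== SOURCE B (Python) =====
-- def find_shape(permutation):
--     rows = []
--     for x in permutation:
--         num = x
--         placed = False
--         for row in rows:
--             # bisect_right by hand: first index with row[i] > num
--             lo, hi = 0, len(row)
--             while lo < hi:
--                 mid = (lo + hi) // 2
--                 if row[mid] <= num:
--                     lo = mid + 1
--                 else:
--                     hi = mid
--             if lo == len(row):
--                 row.append(num)
--                 placed = True
--                 break
--             row[lo], num = num, row[lo]
--         if not placed:
--             rows.append([num])
--     return "".join(str(len(r)) + "-" for r in rows)
-- ===== Notes on version B (the rewrite author's own statement) =====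
-- stated objective: faster
-- what changed: B keeps only the insertion tableau rows (no recording tableau) and finds each bump position by binary search within the sorted row instead of A's linear backward scan.
import Mathlib
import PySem

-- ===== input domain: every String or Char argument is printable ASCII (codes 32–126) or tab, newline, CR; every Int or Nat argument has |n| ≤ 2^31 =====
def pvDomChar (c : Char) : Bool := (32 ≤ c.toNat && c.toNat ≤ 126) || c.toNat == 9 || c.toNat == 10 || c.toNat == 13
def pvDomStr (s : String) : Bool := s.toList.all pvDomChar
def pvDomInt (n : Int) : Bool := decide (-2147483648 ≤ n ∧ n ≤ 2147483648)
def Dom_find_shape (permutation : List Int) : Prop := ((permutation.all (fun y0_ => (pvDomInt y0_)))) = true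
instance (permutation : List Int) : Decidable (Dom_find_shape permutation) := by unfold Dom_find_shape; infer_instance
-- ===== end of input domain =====

-- B replaces A's linear backward scan in each (sorted) row by a hand-written binary search and
-- drops the recording tableau, which A builds but never uses for the returned shape string.
-- A mutates nothing observable through its return value contract here (it rebuilds/returns lists).

-- ===== PORT A =====
-- inner `while column > 0 and number < insertion_tableau[row][column-1]` loop
def pvScanCol (r : List Int) (number : Int) : Nat → Nat
  | 0 => 0
  | c + 1 => if number < r.getD c 0 then pvScanCol r number c else c + 1

-- the `while True` loop of `insertion`, with `row` the loop variable; the fuel argument only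
-- totalizes the recursion (each pass moves to row+1 and keeps the tableau length, so
-- t.length + 1 passes always suffice); it changes no computed value
def pvInsertionGo : Nat → List (List Int) → Int → Nat → List (List Int) × (Nat × Nat)
  | 0, t, number, row => (t ++ [[number]], (row, 0))
  | fuel + 1, t, number, row =>
    if t.length ≤ row then (t ++ [[number]], (row, 0))
    else
      let r := t.getD row []
      let column := pvScanCol r number r.length
      if column = r.length then (t.set row (r ++ [number]), (row, column))
      else pvInsertionGo fuel (t.set row (r.set column number)) (r.getD column 0) (row + 1)

def pvInsertion (t : List (List Int)) (number : Int) (row : Nat) :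
    List (List Int) × (Nat × Nat) :=
  pvInsertionGo (t.length + 1) t number row

-- Python's `recording` mutates and falls through returning None in its last branch; the caller
-- rebinds recording_tableau to that return value, so the port returns Option (none = that branch).
def pvRecording (rec : List (List Int)) (index : Int) (pos : Nat × Nat) :
    Option (List (List Int)) :=
  if rec.length ≤ pos.1 then some (rec ++ [[index]])
  else if (rec.getD pos.1 []).length ≤ pos.2 then
    some (rec.set pos.1 ((rec.getD pos.1 []) ++ [index]))
  else none

def find_shape (permutation : List Int) : String :=
  let st :=
    (List.range permutation.length).foldl
      (fun (st : List (List Int) × Option (List (List Int))) i =>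
        ((pvInsertion st.1 (permutation.getD i 0) 0).1,
         -- a None recording_tableau would make the next Python call raise; it never occurs
         st.2.bind fun rec => pvRecording rec (Int.ofNat i + 1) (pvInsertion st.1 (permutation.getD i 0) 0).2))
      ([], some [])
  (List.range st.1.length).foldl
    (fun s i => s ++ PySem.Int.toStr (Int.ofNat (st.1.getD i []).length) ++ "-") ""

-- ===== PORT B =====
-- Source B's hand-written bisect_right loop (`while lo < hi: …`); the fuel argument only totalizes
-- the recursion (the gap hi - lo shrinks each pass, so hi - lo passes suffice)
def pvBisectGo (row : List Int) (num : Int) : Nat → Nat → Nat → Nat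
  | 0, lo, _ => lo
  | fuel + 1, lo, hi =>
    if lo < hi then
      let mid := (lo + hi) / 2
      if row.getD mid 0 ≤ num then pvBisectGo row num fuel (mid + 1) hi
      else pvBisectGo row num fuel lo mid
    else lo

def pvBisect (row : List Int) (num : Int) (lo hi : Nat) : Nat :=
  pvBisectGo row num (hi - lo) lo hi

-- Source B's `for row in rows: … break` / `if not placed` body for one inserted number
def pvInsertRow (rows : List (List Int)) (num : Int) : List (List Int) :=
  match rows with
  | [] => [[num]]
  | r :: rest =>
    let lo := pvBisect r num 0 r.length
    if lo = r.length then (r ++ [num]) :: rest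
    else (r.set lo num) :: pvInsertRow rest (r.getD lo 0)

def find_shape_alt (permutation : List Int) : String :=
  let rows := permutation.foldl pvInsertRow []
  String.join (rows.map fun r => PySem.Int.toStr (Int.ofNat r.length) ++ "-")

-- ===== PRECONDITION & SPEC =====
def Spec_find_shape (permutation : List Int) (out : String) : Prop := out = find_shape_alt permutation
instance (permutation : List Int) (out : String) : Decidable (Spec_find_shape permutation out) := by unfold Spec_find_shape; infer_instance

-- ===== CLAIM (what is proved, stated in full; the proofs are below) =====
def Claim_equal_find_shape : Prop := ∀ (permutation : List Int), Dom_find_shape permutation → Spec_find_shape permutation (find_shape permutation)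

-- ===== LEMMAS AND PROOFS =====

def pvAllSorted (t : List (List Int)) : Prop := ∀ r ∈ t, List.Pairwise (· ≤ ·) r

theorem pvScanCol_le (r : List Int) (num : Int) (c : Nat) : pvScanCol r num c ≤ c := by
  induction c with
  | zero => simp [pvScanCol]
  | succ c ih => simp only [pvScanCol]; split <;> omega

theorem pvScanCol_spec (r : List Int) (num : Int) (c : Nat) :
    (∀ j, pvScanCol r num c ≤ j → j < c → num < r.getD j 0) ∧
    (pvScanCol r num c ≠ 0 → r.getD (pvScanCol r num c - 1) 0 ≤ num) := by
  induction c with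
  | zero => simp [pvScanCol]
  | succ c ih =>
    simp only [pvScanCol]
    split
    · rename_i h
      refine ⟨fun j hj hjc => ?_, ih.2⟩
      rcases Nat.lt_or_ge j c with hc | hc
      · exact ih.1 j hj hc
      · have : j = c := by omega
        subst this; exact h
    · rename_i h
      exact ⟨fun j hj hjc => by omega, fun _ => by simpa using not_lt.mp h⟩

theorem pvBisectGo_spec (r : List Int) (num : Int) (hs : List.Pairwise (· ≤ ·) r) :
    ∀ (n lo hi : Nat), hi - lo ≤ n → lo ≤ hi → hi ≤ r.length →
    (∀ j, j < lo → r.getD j 0 ≤ num) →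
    (∀ j, hi ≤ j → j < r.length → num < r.getD j 0) →
    (pvBisectGo r num n lo hi ≤ r.length) ∧
    (∀ j, j < pvBisectGo r num n lo hi → r.getD j 0 ≤ num) ∧
    (∀ j, pvBisectGo r num n lo hi ≤ j → j < r.length → num < r.getD j 0) := by
  intro n
  induction n with
  | zero =>
    intro lo hi hn hlh hhl h1 h2
    have : lo = hi := by omega
    subst this
    simp only [pvBisectGo]
    exact ⟨by omega, h1, h2⟩
  | succ n ih =>
    intro lo hi hn hlh hhl h1 h2
    simp only [pvBisectGo]
    by_cases hlt : lo < hi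
    · simp only [hlt, if_true]
      have hmid1 : lo ≤ (lo + hi) / 2 := by omega
      have hmid2 : (lo + hi) / 2 < hi := by omega
      by_cases hv : r.getD ((lo + hi) / 2) 0 ≤ num
      · simp only [hv, if_true]
        refine ih ((lo + hi) / 2 + 1) hi (by omega) (by omega) hhl (fun j hj => ?_) h2
        have hjlen : j < r.length := by omega
        rcases Nat.lt_or_ge j lo with hc | hc
        · exact h1 j hc
        · -- lo ≤ j ≤ mid < hi ≤ len: sortedness gives r[j] ≤ r[mid] ≤ num
          rcases Nat.lt_or_ge j ((lo + hi) / 2) with hc2 | hc2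
          · have hmlen : (lo + hi) / 2 < r.length := by omega
            have := List.pairwise_iff_getElem.mp hs j ((lo + hi) / 2) hjlen hmlen hc2
            rw [List.getD_eq_getElem r 0 hjlen]
            calc r[j] ≤ r[(lo + hi) / 2] := this
              _ = r.getD ((lo + hi) / 2) 0 := (List.getD_eq_getElem r 0 hmlen).symm
              _ ≤ num := hv
          · have : j = (lo + hi) / 2 := by omega
            subst this; exact hv
      · simp only [hv, if_false]
        refine ih lo ((lo + hi) / 2) (by omega) (by omega) (by omega) h1 (fun j hj hjlen => ?_)
        push Not at hv
        have hmlen : (lo + hi) / 2 < r.length := by omega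
        rcases Nat.lt_or_ge j ((lo + hi) / 2) with hc | hc
        · omega
        · rcases Nat.eq_or_lt_of_le hc with hc2 | hc2
          · exact hc2 ▸ hv
          · have := List.pairwise_iff_getElem.mp hs ((lo + hi) / 2) j hmlen hjlen hc2
            rw [List.getD_eq_getElem r 0 hjlen]
            calc num < r.getD ((lo + hi) / 2) 0 := hv
              _ = r[(lo + hi) / 2] := List.getD_eq_getElem r 0 hmlen
              _ ≤ r[j] := this
    · simp only [hlt, if_false]
      have : lo = hi := by omega
      subst this
      exact ⟨by omega, h1, h2⟩

theorem pvBisect_spec (r : List Int) (num : Int) (hs : List.Pairwise (· ≤ ·) r) :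
    (pvBisect r num 0 r.length ≤ r.length) ∧
    (∀ j, j < pvBisect r num 0 r.length → r.getD j 0 ≤ num) ∧
    (∀ j, pvBisect r num 0 r.length ≤ j → j < r.length → num < r.getD j 0) := by
  have h := pvBisectGo_spec r num hs r.length 0 r.length (by omega) (by omega) (le_refl _)
    (fun j hj => absurd hj (Nat.not_lt_zero j)) (fun j hj hjl => absurd hjl (by omega))
  simpa [pvBisect] using h

-- on a sorted row, A's backward linear scan lands where B's binary search does
theorem pvScan_eq_bisect (r : List Int) (num : Int) (hs : List.Pairwise (· ≤ ·) r) :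
    pvScanCol r num r.length = pvBisect r num 0 r.length := by
  have hb := pvBisect_spec r num hs
  have hsle := pvScanCol_le r num r.length
  have hss := pvScanCol_spec r num r.length
  set k1 := pvScanCol r num r.length with hk1
  set k2 := pvBisect r num 0 r.length with hk2
  rcases Nat.lt_trichotomy k1 k2 with h | h | h
  · -- num < r[k2-1] (scan) but r[k2-1] ≤ num (bisect)
    have h1 := hss.1 (k2 - 1) (by omega) (by omega)
    have h2 := hb.2.1 (k2 - 1) (by omega)
    omega
  · exact h
  · have h1 := hb.2.2 (k1 - 1) (by omega) (by omega)
    have h2 := hss.2 (by omega)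
    omega

theorem pvSet_append_mid (pre rest : List (List Int)) (r x : List Int) :
    (pre ++ r :: rest).set pre.length x = pre ++ x :: rest := by
  rw [List.set_append_right _ _ (le_refl _)]; simp

-- one insertion step: A's row-indexed loop on pre ++ rest equals pre ++ B's structural recursion on rest
theorem pvInsertionGo_eq (rest : List (List Int)) :
    ∀ (fuel : Nat) (pre : List (List Int)) (num : Int), rest.length < fuel → pvAllSorted rest →
    (pvInsertionGo fuel (pre ++ rest) num pre.length).1 = pre ++ pvInsertRow rest num := by
  induction rest with
  | nil =>
    intro fuel pre num hfuel _
    cases fuel with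
    | zero => omega
    | succ fuel => simp [pvInsertionGo, pvInsertRow]
  | cons r rest ih =>
    intro fuel pre num hfuel hsort
    cases fuel with
    | zero => simp at hfuel
    | succ fuel =>
      have hr : List.Pairwise (· ≤ ·) r := hsort r (by simp)
      have hlen : ¬ (pre ++ r :: rest).length ≤ pre.length := by simp
      simp only [pvInsertionGo, hlen, if_false]
      have hget : (pre ++ r :: rest).getD pre.length [] = r := by simp
      rw [hget, pvScan_eq_bisect r num hr]
      simp only [pvInsertRow]
      by_cases hc : pvBisect r num 0 r.length = r.length
      · simp only [hc, if_true]
        exact pvSet_append_mid pre rest r (r ++ [num])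
      · simp only [hc, if_false]
        rw [pvSet_append_mid pre rest r (r.set (pvBisect r num 0 r.length) num)]
        have : pre ++ r.set (pvBisect r num 0 r.length) num :: rest
             = (pre ++ [r.set (pvBisect r num 0 r.length) num]) ++ rest := by simp
        rw [this]
        have hlen2 : pre.length + 1 = (pre ++ [r.set (pvBisect r num 0 r.length) num]).length := by simp
        rw [hlen2, ih fuel _ _ (by simp at hfuel; omega) (fun q hq => hsort q (by simp [hq]))]
        simp

theorem pvInsertRow_sorted (rows : List (List Int)) :
    ∀ num, pvAllSorted rows → pvAllSorted (pvInsertRow rows num) := by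
  induction rows with
  | nil =>
    intro num _ q hq
    simp [pvInsertRow] at hq
    subst hq; simp
  | cons r rest ih =>
    intro num hsort
    have hr : List.Pairwise (· ≤ ·) r := hsort r (by simp)
    have hb := pvBisect_spec r num hr
    simp only [pvInsertRow]
    by_cases hc : pvBisect r num 0 r.length = r.length
    · simp only [hc, if_true]
      intro q hq
      rcases List.mem_cons.mp hq with hq | hq
      · subst hq
        rw [List.pairwise_append]
        refine ⟨hr, by simp, fun a ha b hb' => ?_⟩
        simp at hb'; subst hb'
        obtain ⟨j, hjl, hje⟩ := List.mem_iff_getElem.mp ha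
        have := hb.2.1 j (by omega)
        rw [List.getD_eq_getElem r 0 hjl, hje] at this
        exact this
      · exact hsort q (by simp [hq])
    · simp only [hc, if_false]
      intro q hq
      rcases List.mem_cons.mp hq with hq | hq
      · subst hq
        have hklen : pvBisect r num 0 r.length < r.length := by
          rcases Nat.lt_or_ge (pvBisect r num 0 r.length) r.length with h | h
          · exact h
          · omega
        rw [List.pairwise_iff_getElem]
        intro i j hi hj hij
        simp only [List.length_set] at hi hj
        rw [List.getElem_set, List.getElem_set]
        split_ifs with hik hjk hjk
        · omega
        · have := hb.2.2 j (by omega) hj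
          rw [List.getD_eq_getElem r 0 hj] at this
          omega
        · have := hb.2.1 i (by omega)
          rw [List.getD_eq_getElem r 0 hi] at this
          exact this
        · exact List.pairwise_iff_getElem.mp hr i j hi hj hij
      · exact ih (r.getD (pvBisect r num 0 r.length) 0) (fun q' hq' => hsort q' (by simp [hq'])) q hq

-- the two outer folds build the same tableau
theorem pvFold_eq (xs : List Int) :
    ∀ (t : List (List Int)), pvAllSorted t →
    xs.foldl (fun t x => (pvInsertion t x 0).1) t = xs.foldl pvInsertRow t := by
  induction xs with
  | nil => intro t _; rfl
  | cons x xs ih =>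
    intro t hsort
    simp only [List.foldl_cons]
    have h0 : (pvInsertion t x 0).1 = pvInsertRow t x := by
      have := pvInsertionGo_eq t (t.length + 1) [] x (by omega) hsort
      simpa [pvInsertion] using this
    rw [h0]
    exact ih _ (pvInsertRow_sorted t x hsort)

-- index-fold over range = structural fold
theorem pvFoldl_range_getD {α β : Type} (l : List α) (d : α) (f : β → α → β) :
    ∀ (init : β),
    (List.range l.length).foldl (fun s i => f s (l.getD i d)) init = l.foldl f init := by
  induction l with
  | nil => intro init; rfl
  | cons a l ih =>
    intro init
    rw [List.length_cons, List.range_succ_eq_map, List.foldl_cons, List.foldl_map]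
    simpa using ih (f init a)

-- first projection of A's paired fold (tableau, recording) is the tableau-only fold
theorem pvFst_foldl {α β γ : Type} (l : List γ) (f : α → γ → α) (g : α × β → γ → β) :
    ∀ (init : α × β),
    (l.foldl (fun st c => (f st.1 c, g st c)) init).1 = l.foldl f init.1 := by
  induction l with
  | nil => intro init; rfl
  | cons c l ih => intro init; simp only [List.foldl_cons]; exact ih _

theorem pvJoin_acc (l : List String) :
    ∀ (a : String), l.foldl (· ++ ·) a = a ++ l.foldl (· ++ ·) "" := by
  induction l with
  | nil => intro a; simp
  | cons x l ih =>
    intro a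
    simp only [List.foldl_cons]
    rw [ih (a ++ x), ih ("" ++ x), String.empty_append, String.append_assoc]

theorem pvJoin_cons (x : String) (l : List String) :
    String.join (x :: l) = x ++ String.join l := by
  show (x :: l).foldl (· ++ ·) "" = x ++ l.foldl (· ++ ·) ""
  rw [List.foldl_cons, pvJoin_acc l ("" ++ x), String.empty_append]

-- A's string accumulation equals B's join
theorem pvString_fold_join (rows : List (List Int)) :
    ∀ (acc : String),
    rows.foldl (fun s r => s ++ PySem.Int.toStr (Int.ofNat r.length) ++ "-") acc
      = acc ++ String.join (rows.map fun r => PySem.Int.toStr (Int.ofNat r.length) ++ "-") := by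
  induction rows with
  | nil => intro acc; simp [String.join]
  | cons r rows ih =>
    intro acc
    rw [List.foldl_cons, ih, List.map_cons, pvJoin_cons]
    simp only [String.append_assoc]

-- ===== VERDICT (by name: the statement is the Claim_ definition above) =====
theorem find_shape_spec : Claim_equal_find_shape := by
  intro permutation _
  unfold Spec_find_shape find_shape find_shape_alt
  have hfst := pvFst_foldl (List.range permutation.length)
    (fun t i => (pvInsertion t (permutation.getD i 0) 0).1)
    (fun st i => st.2.bind fun rec => pvRecording rec (Int.ofNat i + 1) (pvInsertion st.1 (permutation.getD i 0) 0).2)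
    ([], some [])
  simp only []
  rw [hfst]
  rw [pvFoldl_range_getD permutation 0 (fun t x => (pvInsertion t x 0).1)]
  rw [pvFold_eq permutation [] (by intro r hr; simp at hr)]
  rw [pvFoldl_range_getD (permutation.foldl pvInsertRow [])
      ([] : List Int) (fun s r => s ++ PySem.Int.toStr (Int.ofNat r.length) ++ "-")]
  rw [pvString_fold_join]
  simp
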